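-- pv_equiv track=rewrite | github.com/Hero0963/ml-workshop | scripts/lc_375_minimax_strategy.py | solve_discrete
-- ===== SOURCE A (Python) =====
-- def solve_discrete(arr: list[int]) -> tuple:
--     """
--     Calculates the Minimax cost for a discrete set of numbers.
--     Args:
--         arr (list[int]): A list of distinct integers.
--     Returns:
--         tuple: (min_cost, dp_table, root_table)
--     """
--     arr.sort()
--     n = len(arr)
--     dp = [[0] * n for _ in range(n)]
--     root = [[0] * n for _ in range(n)]
--
--     # Base case initialization
--     for i in range(n):
--         root[i][i] = i
--
--     for length in range(2, n + 1):
--         for i in range(n - length + 1):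
--             j = i + length - 1
--             local_min = float("inf")
--             optimal_k_idx = -1
--
--             for k in range(i, j + 1):
--                 cost_left = dp[i][k - 1] if k > i else 0
--                 cost_right = dp[k + 1][j] if k < j else 0
--
--                 cost = arr[k] + max(cost_left, cost_right)
--
--                 if cost < local_min:
--                     local_min = cost
--                     optimal_k_idx = k
--
--             dp[i][j] = local_min
--             root[i][j] = optimal_k_idx
--
--     return dp[0][n - 1], dp, root
-- ===== SOURCE B (Python) =====
-- def solve_discrete(arr: list[int]) -> tuple:
--     """Top-down memoized re-implementation: a recursive best(i, j) fills a
--     dict keyed by interval, and the dp/root tables are read off it at the end.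
--     (Sorts arr in place, like the original.)"""
--     arr.sort()
--     n = len(arr)
--     memo = {}
--
--     def best(i: int, j: int) -> int:
--         if i >= j:
--             return 0
--         if (i, j) in memo:
--             return memo[(i, j)][0]
--         best_cost = None
--         best_k = -1
--         for k in range(i, j + 1):
--             left = best(i, k - 1)
--             right = best(k + 1, j)
--             c = arr[k] + max(left, right)
--             if best_cost is None or c < best_cost:
--                 best_cost, best_k = c, k
--         memo[(i, j)] = (best_cost, best_k)
--         return best_cost
--
--     best(0, n - 1)
--     dp = [[memo[(i, j)][0] if i < j else 0 for j in range(n)] for i in range(n)]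
--     root = [[memo[(i, j)][1] if i < j else (i if i == j else 0)
--              for j in range(n)] for i in range(n)]
--     return dp[0][n - 1], dp, root
-- ===== Notes on version B (the rewrite author's own statement) =====
-- stated objective: alternative
-- what changed: Replaces the bottom-up by-length interval-DP loops (in-place dp/root table filling) with a top-down memoized recursion best(i,j) over a dict keyed by interval, reading the dp/root tables off the memo at the end.
import Mathlib
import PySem

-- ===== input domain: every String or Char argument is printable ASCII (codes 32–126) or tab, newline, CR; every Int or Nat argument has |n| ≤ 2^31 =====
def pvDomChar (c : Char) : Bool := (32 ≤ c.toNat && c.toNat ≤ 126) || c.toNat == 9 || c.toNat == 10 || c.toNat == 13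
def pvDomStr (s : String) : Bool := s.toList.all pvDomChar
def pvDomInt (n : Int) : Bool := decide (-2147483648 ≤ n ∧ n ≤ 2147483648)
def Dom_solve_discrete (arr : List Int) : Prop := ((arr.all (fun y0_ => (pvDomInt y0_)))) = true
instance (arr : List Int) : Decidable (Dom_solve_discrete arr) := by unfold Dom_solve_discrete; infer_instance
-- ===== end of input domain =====

-- B replaces A's bottom-up by-length interval-DP loops with a top-down memoized
-- recursion over a dict keyed by interval (alternative decomposition, same cost);
-- both sort their argument in place in Python — the equivalence proved is about the return value.


-- ===== PORT A =====
-- shared 2-D table helpers: m[i][j] read (default 0, indices provably in range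
-- wherever the Python indexes) and m[i][j] := v
def get2 (m : List (List Int)) (i j : Nat) : Int := (m.getD i []).getD j 0
def set2 (m : List (List Int)) (i j : Nat) (v : Int) : List (List Int) :=
  m.set i ((m.getD i []).set j v)

-- the body of A's innermost `for k in range(i, j+1)` loop; state = (local_min, optimal_k_idx),
-- local_min = none models float("inf")
def kstep (a : List Int) (dp : List (List Int)) (i j : Nat) (s : Option Int × Int) (k : Nat) :
    Option Int × Int :=
  let cost_left : Int := if i < k then get2 dp i (k - 1) else 0
  let cost_right : Int := if k < j then get2 dp (k + 1) j else 0
  let cost := a.getD k 0 + max cost_left cost_right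
  match s.1 with
  | none => (some cost, (k : Int))
  | some m => if cost < m then (some cost, (k : Int)) else s

-- body of `for i in range(n - length + 1)`
def istep (a : List Int) (length : Nat) (st : List (List Int) × List (List Int)) (i : Nat) :
    List (List Int) × List (List Int) :=
  let j := i + length - 1
  let s := (List.range' i length).foldl (kstep a st.1 i j) (none, -1)
  (set2 st.1 i j (s.1.getD 0), set2 st.2 i j s.2)

-- body of `for length in range(2, n+1)`
def lstep (a : List Int) (n : Nat) (st : List (List Int) × List (List Int)) (length : Nat) :
    List (List Int) × List (List Int) :=
  (List.range (n - length + 1)).foldl (istep a length) st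

-- A, step for step; Python's ranges run over provably nonnegative ints, ported as Nat
-- ranges (exact here); dp[0][n-1] on the empty list raises IndexError in Python — excluded by Pre_.
def solve_discrete (arr : List Int) : Int × List (List Int) × List (List Int) :=
  let a := PySem.List.sorted arr (fun x => x) false   -- arr.sort()
  let n := a.length
  let dp0 : List (List Int) := List.replicate n (List.replicate n 0)
  let root0 : List (List Int) :=
    (List.range n).foldl (fun r i => set2 r i i (Int.ofNat i))
      (List.replicate n (List.replicate n 0))
  let st := (List.range' 2 (n - 1)).foldl (lstep a n) (dp0, root0)
  (get2 st.1 0 (n - 1), st.1, st.2)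

-- ===== PORT B =====
-- B's memo dict: interval (i, j) ↦ (best cost, chosen split)
abbrev Memo := PySem.Dict (Nat × Nat) (Int × Int)

-- B's recursive best(i, j), memo threaded through; fuel d makes the recursion structural —
-- every call keeps j - i ≤ d, so the fuel-0 branch coincides with Python's `if i >= j: return 0`
-- the body of B's `for k in range(i, j+1)` loop: state = (best_cost, best_k, memo),
-- f is the recursive call (bestF at the next fuel level)
def bbody (f : Nat → Nat → Memo → Int × Memo) (a : List Int) (i j : Nat)
    (s : Option Int × Int × Memo) (k : Nat) : Option Int × Int × Memo :=
  let lm := f i (k - 1) s.2.2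
  let rm := f (k + 1) j lm.2
  let c := a.getD k 0 + max lm.1 rm.1
  match s.1 with
  | none => (some c, (k : Int), rm.2)
  | some bc => if c < bc then (some c, (k : Int), rm.2) else (some bc, s.2.1, rm.2)

def bestF (a : List Int) : Nat → Nat → Nat → Memo → Int × Memo
  | 0, _, _, memo => (0, memo)
  | d + 1, i, j, memo =>
    if j ≤ i then (0, memo)
    else
      match memo.get? (i, j) with
      | some v => (v.1, memo)
      | none =>
        let r := (List.range' i (j + 1 - i)).foldl (bbody (bestF a d) a i j) (none, -1, memo)
        (r.1.getD 0, r.2.2.insert (i, j) (r.1.getD 0, r.2.1))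

def solve_discrete_alt (arr : List Int) : Int × List (List Int) × List (List Int) :=
  let a := PySem.List.sorted arr (fun x => x) false   -- arr.sort()
  let n := a.length
  let memo := (bestF a n 0 (n - 1) PySem.Dict.empty).2   -- best(0, n-1)
  let dp := (List.range n).map (fun i => (List.range n).map (fun j =>
    if i < j then (memo.getD (i, j) (0, 0)).1 else 0))
  let root := (List.range n).map (fun i => (List.range n).map (fun j =>
    if i < j then (memo.getD (i, j) (0, 0)).2 else if i = j then (i : Int) else 0))
  (get2 dp 0 (n - 1), dp, root)

-- ===== PRECONDITION & SPEC =====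
-- Python A raises IndexError (dp[0][n-1] on empty tables) on the empty list; excluded.
def Pre_solve_discrete (arr : List Int) : Prop := arr ≠ []
instance (arr : List Int) : Decidable (Pre_solve_discrete arr) := by
  unfold Pre_solve_discrete; infer_instance

def pvWitness_solve_discrete : List Int := [3, 1, 2]

def Spec_solve_discrete (arr : List Int) (out : Int × List (List Int) × List (List Int)) : Prop :=
  out = solve_discrete_alt arr
instance (arr : List Int) (out : Int × List (List Int) × List (List Int)) :
    Decidable (Spec_solve_discrete arr out) := by unfold Spec_solve_discrete; infer_instance

-- ===== CLAIM (what is proved, stated in full; the proofs are below) =====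
def Claim_equal_solve_discrete : Prop := ∀ (arr : List Int), Dom_solve_discrete arr →
  Pre_solve_discrete arr → Spec_solve_discrete arr (solve_discrete arr)

-- ===== LEMMAS AND PROOFS =====

-- the common pure specification: mm a i j = (minimal cost, leftmost optimal split) for [i, j]
def selStep (c : Nat → Int) (s : Option Int × Int) (k : Nat) : Option Int × Int :=
  match s.1 with
  | none => (some (c k), (k : Int))
  | some m => if c k < m then (some (c k), (k : Int)) else s

def selMin (c : Nat → Int) (ks : List Nat) : Option Int × Int := ks.foldl (selStep c) (none, -1)

def mmF (a : List Int) : Nat → Nat → Nat → Int × Int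
  | 0, i, _ => (0, (i : Int))
  | d + 1, i, j =>
    if i < j then
      let s := selMin (fun k => a.getD k 0 +
        max (if i < k then (mmF a d i (k - 1)).1 else 0)
            (if k < j then (mmF a d (k + 1) j).1 else 0)) (List.range' i (j + 1 - i))
      (s.1.getD 0, s.2)
    else (0, (i : Int))

def mm (a : List Int) (i j : Nat) : Int × Int := mmF a (j - i) i j

def cc (a : List Int) (i j k : Nat) : Int :=
  a.getD k 0 + max (if i < k then (mm a i (k - 1)).1 else 0)
                   (if k < j then (mm a (k + 1) j).1 else 0)

def tbl (n : Nat) (f : Nat → Nat → Int) : List (List Int) :=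
  (List.range n).map (fun i => (List.range n).map (f i))

def dpS (a : List Int) (i j : Nat) : Int := if i < j then (mm a i j).1 else 0
def rtS (a : List Int) (i j : Nat) : Int :=
  if i < j then (mm a i j).2 else if i = j then (i : Int) else 0

theorem mm_base (a : List Int) {i j : Nat} (h : j ≤ i) : mm a i j = (0, (i : Int)) := by
  have h0 : j - i = 0 := by omega
  simp [mm, h0, mmF]

theorem selMin_congr {c1 c2 : Nat → Int} {ks : List Nat} (h : ∀ k ∈ ks, c1 k = c2 k) :
    selMin c1 ks = selMin c2 ks := by
  unfold selMin
  apply PySem.List.foldl_congr_mem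
  intro acc k hk
  simp [selStep, h k hk]

theorem mmF_eq (a : List Int) : ∀ d i j, j - i ≤ d → mmF a d i j = mm a i j := by
  intro d
  induction d using Nat.strong_induction_on with
  | _ d ih =>
  match d with
  | 0 =>
    intro i j h
    have h0 : j - i = 0 := Nat.le_zero.mp h
    simp [mm, h0]
  | d + 1 =>
    intro i j h
    by_cases hij : i < j
    · have canon : ∀ e, j - i ≤ e + 1 → e ≤ d → mmF a (e + 1) i j =
          ((selMin (cc a i j) (List.range' i (j + 1 - i))).1.getD 0,
           (selMin (cc a i j) (List.range' i (j + 1 - i))).2) := by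
        intro e he hed
        have ihe : ∀ i' j', j' - i' ≤ e → mmF a e i' j' = mm a i' j' := by
          intro i' j' hm
          rcases Nat.eq_zero_or_pos e with rfl | hpos
          · have h0 : j' - i' = 0 := Nat.le_zero.mp hm
            simp [mm, h0]
          · exact ih e (by omega) i' j' hm
        have hsel : selMin (fun k => a.getD k 0 +
            max (if i < k then (mmF a e i (k - 1)).1 else 0)
                (if k < j then (mmF a e (k + 1) j).1 else 0)) (List.range' i (j + 1 - i)) =
            selMin (cc a i j) (List.range' i (j + 1 - i)) := by
          apply selMin_congr
          intro k hk
          have hk' := List.mem_range'_1.mp hk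
          have hl : mmF a e i (k - 1) = mm a i (k - 1) := ihe i (k - 1) (by omega)
          have hr : mmF a e (k + 1) j = mm a (k + 1) j := ihe (k + 1) j (by omega)
          rw [cc, hl, hr]
        simp only [mmF, if_pos hij, hsel]
      have h2 : j - i = (j - i - 1) + 1 := by omega
      rw [canon d h (by omega), mm, h2, canon (j - i - 1) (by omega) (by omega)]
    · have h0 : j - i = 0 := by omega
      simp [mmF, hij, mm, h0]

theorem mm_eq (a : List Int) {i j : Nat} (h : i < j) :
    mm a i j = ((selMin (cc a i j) (List.range' i (j + 1 - i))).1.getD 0,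
                (selMin (cc a i j) (List.range' i (j + 1 - i))).2) := by
  have h2 : j - i = (j - i - 1) + 1 := by omega
  have hsel : selMin (fun k => a.getD k 0 +
      max (if i < k then (mmF a (j - i - 1) i (k - 1)).1 else 0)
          (if k < j then (mmF a (j - i - 1) (k + 1) j).1 else 0)) (List.range' i (j + 1 - i)) =
      selMin (cc a i j) (List.range' i (j + 1 - i)) := by
    apply selMin_congr
    intro k hk
    have hk' := List.mem_range'_1.mp hk
    have hl := mmF_eq a (j - i - 1) i (k - 1) (by omega)
    have hr := mmF_eq a (j - i - 1) (k + 1) j (by omega)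
    rw [cc, hl, hr]
  rw [mm, h2]
  simp only [mmF, if_pos h, hsel]

theorem getD_map_range {n i : Nat} {α : Type} [Inhabited α] (g : Nat → α) (d : α) (h : i < n) :
    (((List.range n).map g).getD i d) = g i := by
  rw [List.getD_eq_getElem?_getD]
  simp [h]

theorem set_map_range {n i : Nat} {α : Type} (g : Nat → α) (x : α) :
    ((List.range n).map g).set i x =
      (List.range n).map (fun t => if t = i then x else g t) := by
  apply List.ext_getElem
  · simp
  · intro t h1 h2
    simp only [List.getElem_set, List.getElem_map, List.getElem_range]
    by_cases ht : t = i
    · simp [ht]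
    · rw [if_neg (by omega), if_neg ht]

theorem get2_tbl {n i j : Nat} (f : Nat → Nat → Int) (hi : i < n) (hj : j < n) :
    get2 (tbl n f) i j = f i j := by
  rw [get2, tbl, getD_map_range _ _ hi, getD_map_range _ _ hj]

theorem set2_tbl {n i j : Nat} (f : Nat → Nat → Int) (v : Int) (hi : i < n) :
    set2 (tbl n f) i j v =
      tbl n (fun p q => if p = i ∧ q = j then v else f p q) := by
  rw [set2, tbl, getD_map_range _ _ hi, set_map_range, set_map_range]
  apply List.map_congr_left
  intro p hp
  by_cases hpi : p = i
  · subst hpi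
    rw [if_pos rfl]
    apply List.map_congr_left
    intro q hq
    by_cases hqj : q = j <;> simp [hqj]
  · simp only [if_neg hpi]
    apply List.map_congr_left
    intro q hq
    simp [hpi]

theorem tbl_congr {n : Nat} {f g : Nat → Nat → Int}
    (h : ∀ i, i < n → ∀ j, j < n → f i j = g i j) : tbl n f = tbl n g := by
  unfold tbl
  apply List.map_congr_left
  intro i hi
  apply List.map_congr_left
  intro j hj
  exact h i (List.mem_range.mp hi) j (List.mem_range.mp hj)

theorem replicate_eq_tbl (n : Nat) :
    List.replicate n (List.replicate n (0 : Int)) = tbl n (fun _ _ => 0) := by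
  simp [tbl, List.map_const']

-- A-side partial-table descriptions: lengths ≤ L done (upTo), plus the first m rows of length ℓ (mix)
def upTo (a : List Int) (L i j : Nat) : Int :=
  if i < j ∧ j < i + L then (mm a i j).1 else 0
def upToR (a : List Int) (L i j : Nat) : Int :=
  if i < j ∧ j < i + L then (mm a i j).2 else if i = j then (i : Int) else 0
def mixD (a : List Int) (l m i j : Nat) : Int :=
  if i < j ∧ (j < i + (l - 1) ∨ (j + 1 = i + l ∧ i < m)) then (mm a i j).1 else 0
def mixR (a : List Int) (l m i j : Nat) : Int :=
  if i < j ∧ (j < i + (l - 1) ∨ (j + 1 = i + l ∧ i < m)) then (mm a i j).2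
  else if i = j then (i : Int) else 0

theorem root0_eq (n : Nat) :
    (List.range n).foldl (fun r i => set2 r i i (Int.ofNat i))
      (List.replicate n (List.replicate n 0)) =
      tbl n (fun i j => if i = j then (i : Int) else 0) := by
  rw [replicate_eq_tbl]
  suffices h : ∀ m, m ≤ n → (List.range m).foldl (fun r i => set2 r i i (Int.ofNat i))
      (tbl n (fun _ _ => 0)) = tbl n (fun i j => if i = j ∧ i < m then (i : Int) else 0) by
    rw [h n (le_refl n)]
    apply tbl_congr
    intro i hi j hj
    by_cases hij : i = j <;> simp [hij, hj]
  intro m hm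
  induction m with
  | zero =>
    simp only [List.range_zero, List.foldl_nil]
    apply tbl_congr; intro i _ j _; simp
  | succ m ih =>
    rw [List.range_succ, List.foldl_append, ih (by omega)]
    simp only [List.foldl_cons, List.foldl_nil]
    rw [set2_tbl _ _ (by omega)]
    apply tbl_congr
    intro p hp q hq
    simp only [Int.ofNat_eq_natCast]
    split_ifs <;> omega

theorem kfold_eq (a : List Int) (n : Nat) (F : Nat → Nat → Int) (i j : Nat)
    (hleft : ∀ k, i < k → k ≤ j → get2 (tbl n F) i (k - 1) = (mm a i (k - 1)).1)
    (hright : ∀ k, i ≤ k → k < j → get2 (tbl n F) (k + 1) j = (mm a (k + 1) j).1)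
    (init : Option Int × Int) :
    (List.range' i (j + 1 - i)).foldl (kstep a (tbl n F) i j) init =
      (List.range' i (j + 1 - i)).foldl (selStep (cc a i j)) init := by
  apply PySem.List.foldl_congr_mem
  intro acc k hk
  have hk' := List.mem_range'_1.mp hk
  have hcl : (if i < k then get2 (tbl n F) i (k - 1) else 0) =
      (if i < k then (mm a i (k - 1)).1 else 0) := by
    split_ifs with h
    · exact hleft k h (by omega)
    · rfl
  have hcr : (if k < j then get2 (tbl n F) (k + 1) j else 0) =
      (if k < j then (mm a (k + 1) j).1 else 0) := by
    split_ifs with h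
    · exact hright k (by omega) h
    · rfl
  simp only [kstep, selStep, cc, hcl, hcr]

theorem istep_eq (a : List Int) (n l m : Nat) (h2 : 2 ≤ l) (hl : l ≤ n) (hm : m ≤ n - l) :
    istep a l (tbl n (mixD a l m), tbl n (mixR a l m)) m =
      (tbl n (mixD a l (m + 1)), tbl n (mixR a l (m + 1))) := by
  have hj : m + l - 1 < n := by omega
  have hmj : m < m + l - 1 := by omega
  have hrange : m + l - 1 + 1 - m = l := by omega
  simp only [istep]
  rw [show List.range' m l = List.range' m (m + l - 1 + 1 - m) by rw [hrange]]
  rw [kfold_eq a n (mixD a l m) m (m + l - 1)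
    (by
      intro k hik hkj
      rw [get2_tbl _ (by omega) (by omega), mixD]
      by_cases h : m < k - 1
      · rw [if_pos ⟨h, Or.inl (by omega)⟩]
      · have hk1 : k - 1 = m := by omega
        rw [hk1, if_neg (by omega), mm_base a (le_refl m)])
    (by
      intro k hik hkj
      rw [get2_tbl _ (by omega) (by omega), mixD]
      by_cases h : k + 1 < m + l - 1
      · rw [if_pos ⟨h, Or.inl (by omega)⟩]
      · have hk1 : k + 1 = m + l - 1 := by omega
        rw [if_neg (by omega), hk1, mm_base a (le_refl (m + l - 1))])]
  have hmm := mm_eq a hmj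
  rw [Prod.mk.injEq]
  refine ⟨?_, ?_⟩
  · rw [set2_tbl _ _ (by omega)]
    apply tbl_congr
    intro p hp q hq
    by_cases hpq : p = m ∧ q = m + l - 1
    · rw [if_pos hpq, mixD, if_pos (by omega)]
      rw [hpq.1, hpq.2, hmm]
      rfl
    · rw [if_neg hpq, mixD, mixD]
      split_ifs <;> first | rfl | omega
  · rw [set2_tbl _ _ (by omega)]
    apply tbl_congr
    intro p hp q hq
    by_cases hpq : p = m ∧ q = m + l - 1
    · rw [if_pos hpq, mixR, if_pos (by omega)]
      rw [hpq.1, hpq.2, hmm]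
      rfl
    · rw [if_neg hpq, mixR, mixR]
      split_ifs <;> first | rfl | omega

theorem lstep_eq (a : List Int) (n l : Nat) (h2 : 2 ≤ l) (hl : l ≤ n) :
    lstep a n (tbl n (upTo a (l - 1)), tbl n (upToR a (l - 1))) l =
      (tbl n (upTo a l), tbl n (upToR a l)) := by
  simp only [lstep]
  have hmix : ∀ m, m ≤ n - l + 1 →
      (List.range m).foldl (istep a l) (tbl n (upTo a (l - 1)), tbl n (upToR a (l - 1))) =
        (tbl n (mixD a l m), tbl n (mixR a l m)) := by
    intro m hm
    induction m with
    | zero =>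
      simp only [List.range_zero, List.foldl_nil]
      rw [Prod.mk.injEq]
      refine ⟨?_, ?_⟩
      · apply tbl_congr; intro p hp q hq; rw [upTo, mixD]; split_ifs <;> first | rfl | omega
      · apply tbl_congr; intro p hp q hq; rw [upToR, mixR]; split_ifs <;> first | rfl | omega
    | succ m ih =>
      rw [List.range_succ, List.foldl_append, ih (by omega)]
      simp only [List.foldl_cons, List.foldl_nil]
      exact istep_eq a n l m h2 hl (by omega)
  rw [hmix (n - l + 1) (le_refl _)]
  rw [Prod.mk.injEq]
  refine ⟨?_, ?_⟩
  · apply tbl_congr; intro p hp q hq; rw [upTo, mixD]; split_ifs <;> first | rfl | omega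
  · apply tbl_congr; intro p hp q hq; rw [upToR, mixR]; split_ifs <;> first | rfl | omega

theorem outer_eq (a : List Int) (n : Nat) :
    ∀ c, c ≤ n - 1 →
      (List.range' 2 c).foldl (lstep a n) (tbl n (upTo a 1), tbl n (upToR a 1)) =
        (tbl n (upTo a (c + 1)), tbl n (upToR a (c + 1))) := by
  intro c
  induction c with
  | zero => intro _; simp
  | succ c ih =>
    intro hc
    rw [List.range'_concat, List.foldl_append, ih (by omega)]
    simp only [List.foldl_cons, List.foldl_nil]
    have h21 : 2 + 1 * c = 2 + c := by omega
    rw [h21]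
    have := lstep_eq a n (2 + c) (by omega) (by omega)
    have hshow : 2 + c - 1 = c + 1 := by omega
    rw [hshow] at this
    rw [this]
    have hshow2 : 2 + c = c + 1 + 1 := by omega
    rw [hshow2]

theorem A_eq (arr : List Int) : solve_discrete arr =
    (get2 (tbl (PySem.List.sorted arr (fun x => x) false).length
      (dpS (PySem.List.sorted arr (fun x => x) false))) 0
      ((PySem.List.sorted arr (fun x => x) false).length - 1),
     tbl (PySem.List.sorted arr (fun x => x) false).length
       (dpS (PySem.List.sorted arr (fun x => x) false)),
     tbl (PySem.List.sorted arr (fun x => x) false).length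
       (rtS (PySem.List.sorted arr (fun x => x) false))) := by
  simp only [solve_discrete]
  set a := PySem.List.sorted arr (fun x => x) false with ha
  set n := a.length with hn
  rw [root0_eq, replicate_eq_tbl]
  have e1 : tbl n (fun _ _ => (0 : Int)) = tbl n (upTo a 1) :=
    tbl_congr (fun i hi j hj => by rw [upTo]; split_ifs <;> first | rfl | omega)
  have e2 : tbl n (fun i j => if i = j then (i : Int) else 0) = tbl n (upToR a 1) :=
    tbl_congr (fun i hi j hj => by rw [upToR]; split_ifs <;> first | rfl | omega)
  rw [e1, e2, outer_eq a n (n - 1) (le_refl _)]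
  have e3 : tbl n (upTo a (n - 1 + 1)) = tbl n (dpS a) :=
    tbl_congr (fun i hi j hj => by rw [upTo, dpS]; split_ifs <;> first | rfl | omega)
  have e4 : tbl n (upToR a (n - 1 + 1)) = tbl n (rtS a) :=
    tbl_congr (fun i hi j hj => by rw [upToR, rtS]; split_ifs <;> first | rfl | omega)
  rw [e3, e4]

def GoodM (a : List Int) (m : Memo) : Prop :=
  ∀ i j v, m.get? (i, j) = some v → i < j ∧ v = mm a i j
def MonoM (m m' : Memo) : Prop :=
  ∀ p : Nat × Nat, (m.get? p).isSome = true → (m'.get? p).isSome = true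
def ClosedM (m : Memo) : Prop :=
  ∀ i j, (m.get? (i, j)).isSome = true →
    ∀ p q, i ≤ p → p < q → q ≤ j → (m.get? (p, q)).isSome = true

theorem isSome_insert (m : Memo) (k : Nat × Nat) (v : Int × Int) (p : Nat × Nat)
    (h : (m.get? p).isSome = true) : ((m.insert k v).get? p).isSome = true := by
  rw [PySem.Dict.get?_insert]
  split_ifs <;> simp_all

theorem bfold (a : List Int) (d i j : Nat)
    (IH : ∀ i' j' memo, j' - i' ≤ d → GoodM a memo → ClosedM memo →
      (bestF a d i' j' memo).1 = (mm a i' j').1 ∧ GoodM a (bestF a d i' j' memo).2 ∧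
      ClosedM (bestF a d i' j' memo).2 ∧ MonoM memo (bestF a d i' j' memo).2 ∧
      (i' < j' → (((bestF a d i' j' memo).2).get? (i', j')).isSome = true))
    (hij : i < j) (hd : j - i ≤ d + 1) :
    ∀ (ks : List Nat), (∀ k ∈ ks, i ≤ k ∧ k ≤ j) →
    ∀ (s : Option Int × Int × Memo), GoodM a s.2.2 → ClosedM s.2.2 →
      ((ks.foldl (bbody (bestF a d) a i j) s).1,
       (ks.foldl (bbody (bestF a d) a i j) s).2.1) =
        ks.foldl (selStep (cc a i j)) (s.1, s.2.1) ∧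
      GoodM a (ks.foldl (bbody (bestF a d) a i j) s).2.2 ∧
      ClosedM (ks.foldl (bbody (bestF a d) a i j) s).2.2 ∧
      MonoM s.2.2 (ks.foldl (bbody (bestF a d) a i j) s).2.2 ∧
      (∀ k ∈ ks,
        (i < k - 1 →
          (((ks.foldl (bbody (bestF a d) a i j) s).2.2).get? (i, k - 1)).isSome = true) ∧
        (k + 1 < j →
          (((ks.foldl (bbody (bestF a d) a i j) s).2.2).get? (k + 1, j)).isSome = true)) := by
  intro ks
  induction ks with
  | nil =>
    intro _ s hg hc
    exact ⟨rfl, hg, hc, fun p h => h, by simp⟩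
  | cons k ks ihks =>
    intro hmem s hg hc
    obtain ⟨s1, sk, sm⟩ := s
    have hk := hmem k (by simp)
    obtain ⟨hl1, hl2, hl3, hl4, hl5⟩ := IH i (k - 1) sm (by omega) hg hc
    obtain ⟨hr1, hr2, hr3, hr4, hr5⟩ :=
      IH (k + 1) j (bestF a d i (k - 1) sm).2 (by omega) hl2 hl3
    have hcc : a.getD k 0 + max (bestF a d i (k - 1) sm).1
        (bestF a d (k + 1) j (bestF a d i (k - 1) sm).2).1 = cc a i j k := by
      rw [hl1, hr1, cc]
      congr 2
      · split_ifs with h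
        · rfl
        · rw [mm_base a (show k - 1 ≤ i by omega)]
      · split_ifs with h
        · rfl
        · rw [mm_base a (show j ≤ k + 1 by omega)]
    simp only [List.getD_eq_getElem?_getD] at hcc
    have f2 : bbody (bestF a d) a i j (s1, sk, sm) k =
        ((selStep (cc a i j) (s1, sk) k).1, (selStep (cc a i j) (s1, sk) k).2,
         (bestF a d (k + 1) j (bestF a d i (k - 1) sm).2).2) := by
      cases s1 with
      | none => simp [bbody, selStep, hcc]
      | some bc =>
        simp only [bbody, selStep, List.getD_eq_getElem?_getD, hcc]
        by_cases hlt : cc a i j k < bc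
        · simp [hlt]
        · simp [hlt]
    rw [List.foldl_cons, List.foldl_cons, f2]
    obtain ⟨t1, t2, t3, t4, t5⟩ := ihks (fun k' hk' => hmem k' (by simp [hk']))
      ((selStep (cc a i j) (s1, sk) k).1, (selStep (cc a i j) (s1, sk) k).2,
       (bestF a d (k + 1) j (bestF a d i (k - 1) sm).2).2) hr2 hr3
    refine ⟨t1, t2, t3, ?_, ?_⟩
    · intro p hp
      exact t4 p (hr4 p (hl4 p hp))
    · intro k' hk'
      rcases List.mem_cons.mp hk' with rfl | hk'tail
      · constructor
        · intro h
          exact t4 _ (hr4 _ (hl5 h))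
        · intro h
          exact t4 _ (hr5 h)
      · exact t5 k' hk'tail

theorem bestF_spec (a : List Int) : ∀ d i j memo, j - i ≤ d → GoodM a memo → ClosedM memo →
    (bestF a d i j memo).1 = (mm a i j).1 ∧ GoodM a (bestF a d i j memo).2 ∧
    ClosedM (bestF a d i j memo).2 ∧ MonoM memo (bestF a d i j memo).2 ∧
    (i < j → (((bestF a d i j memo).2).get? (i, j)).isSome = true) := by
  intro d
  induction d with
  | zero =>
    intro i j memo h hg hc
    have hji : j ≤ i := by omega
    refine ⟨by rw [mm_base a hji]; rfl, hg, hc, fun p hp => hp, fun hij => absurd hij (by omega)⟩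
  | succ d ih =>
    intro i j memo h hg hc
    by_cases hji : j ≤ i
    · simp only [bestF, if_pos hji]
      refine ⟨by rw [mm_base a hji], hg, hc, fun p hp => hp, fun hij => absurd hij (by omega)⟩
    · have hij : i < j := by omega
      cases hmem : memo.get? (i, j) with
      | some v =>
        obtain ⟨_, hv⟩ := hg i j v hmem
        simp only [bestF, if_neg hji, hmem]
        refine ⟨by rw [hv], hg, hc, fun p hp => hp, fun _ => rfl⟩
      | none =>
        simp only [bestF, if_neg hji, hmem]
        have hks : ∀ k ∈ List.range' i (j + 1 - i), i ≤ k ∧ k ≤ j := by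
          intro k hk
          have := List.mem_range'_1.mp hk
          omega
        obtain ⟨t1, t2, t3, t4, t5⟩ :=
          bfold a d i j ih hij h (List.range' i (j + 1 - i)) hks (none, -1, memo) hg hc
        set R := (List.range' i (j + 1 - i)).foldl (bbody (bestF a d) a i j) (none, -1, memo)
          with hR
        have hsel : (R.1, R.2.1) = selMin (cc a i j) (List.range' i (j + 1 - i)) := t1
        have hR1 : R.1 = (selMin (cc a i j) (List.range' i (j + 1 - i))).1 :=
          congrArg Prod.fst hsel
        have hR2 : R.2.1 = (selMin (cc a i j) (List.range' i (j + 1 - i))).2 :=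
          congrArg Prod.snd hsel
        have hmmv : (R.1.getD 0, R.2.1) = mm a i j := by
          rw [mm_eq a hij, hR1, hR2]
        have hiks : i ∈ List.range' i (j + 1 - i) := List.mem_range'_1.mpr ⟨le_refl i, by omega⟩
        have hjks : j ∈ List.range' i (j + 1 - i) := List.mem_range'_1.mpr ⟨by omega, by omega⟩
        have hA : i + 1 < j → ((R.2.2).get? (i + 1, j)).isSome = true := (t5 i hiks).2
        have hB : i < j - 1 → ((R.2.2).get? (i, j - 1)).isSome = true := (t5 j hjks).1
        refine ⟨by rw [← hmmv], ?_, ?_, ?_, ?_⟩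
        · -- GoodM of the insert
          intro i' j' v hv'
          rw [PySem.Dict.get?_insert] at hv'
          split_ifs at hv' with hkey
          · have hi1 : i' = i := congrArg Prod.fst hkey
            have hj1 : j' = j := congrArg Prod.snd hkey
            have hveq : v = (R.1.getD 0, R.2.1) := by injection hv' with h'; exact h'.symm
            exact ⟨by rw [hi1, hj1]; exact hij, by rw [hveq, hmmv, hi1, hj1]⟩
          · exact t2 i' j' v hv'
        · -- ClosedM of the insert
          intro i' j' hs p q hp hpq hq
          by_cases hpq' : (p, q) = (i, j)
          · rw [PySem.Dict.get?_insert, if_pos hpq']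
            rfl
          · rw [PySem.Dict.get?_insert, if_neg hpq']
            rw [PySem.Dict.get?_insert] at hs
            split_ifs at hs with hkey
            · have hi1 : i' = i := congrArg Prod.fst hkey
              have hj1 : j' = j := congrArg Prod.snd hkey
              rw [hi1] at hp
              rw [hj1] at hq
              by_cases hqj : q < j
              · exact t3 i (j - 1) (hB (by omega)) p q hp hpq (by omega)
              · have hq' : q = j := by omega
                have hpi : i < p := by
                  by_contra h'
                  exact hpq' (by rw [show p = i by omega, hq'])
                exact t3 (i + 1) j (hA (by omega)) p q (by omega) hpq (by omega)
            · exact t3 i' j' hs p q hp hpq hq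
        · intro p hp
          exact isSome_insert _ _ _ _ (t4 p hp)
        · intro _
          rw [PySem.Dict.get?_insert, if_pos rfl]
          rfl

theorem B_eq (arr : List Int) : solve_discrete_alt arr =
    (get2 (tbl (PySem.List.sorted arr (fun x => x) false).length
      (dpS (PySem.List.sorted arr (fun x => x) false))) 0
      ((PySem.List.sorted arr (fun x => x) false).length - 1),
     tbl (PySem.List.sorted arr (fun x => x) false).length
       (dpS (PySem.List.sorted arr (fun x => x) false)),
     tbl (PySem.List.sorted arr (fun x => x) false).length
       (rtS (PySem.List.sorted arr (fun x => x) false))) := by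
  simp only [solve_discrete_alt]
  set a := PySem.List.sorted arr (fun x => x) false with ha
  set n := a.length with hn
  have hge : GoodM a PySem.Dict.empty := by
    intro i j v h
    rw [PySem.Dict.get?_empty] at h
    cases h
  have hce : ClosedM PySem.Dict.empty := by
    intro i j h
    rw [PySem.Dict.get?_empty] at h
    cases h
  obtain ⟨_, t2, t3, _, t5⟩ := bestF_spec a n 0 (n - 1) PySem.Dict.empty (by omega) hge hce
  set M := (bestF a n 0 (n - 1) PySem.Dict.empty).2 with hM
  have hval : ∀ i j, i < j → j < n → M.getD (i, j) (0, 0) = mm a i j := by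
    intro i j hij hjn
    have hsome : (M.get? (i, j)).isSome = true :=
      t3 0 (n - 1) (t5 (by omega)) i j (by omega) hij (by omega)
    obtain ⟨v, hv⟩ := Option.isSome_iff_exists.mp hsome
    obtain ⟨_, hvm⟩ := t2 i j v hv
    rw [PySem.Dict.getD_eq_get?_getD, hv, hvm]
    rfl
  have edp : ((List.range n).map fun i => (List.range n).map fun j =>
      if i < j then (M.getD (i, j) (0, 0)).1 else 0) = tbl n (dpS a) := by
    show tbl n (fun i j => if i < j then (M.getD (i, j) (0, 0)).1 else 0) = tbl n (dpS a)
    apply tbl_congr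
    intro i hi j hj
    rw [dpS]
    split_ifs with h
    · rw [hval i j h hj]
    · rfl
  have ert : ((List.range n).map fun i => (List.range n).map fun j =>
      if i < j then (M.getD (i, j) (0, 0)).2 else if i = j then (i : Int) else 0) =
      tbl n (rtS a) := by
    show tbl n (fun i j => if i < j then (M.getD (i, j) (0, 0)).2
      else if i = j then (i : Int) else 0) = tbl n (rtS a)
    apply tbl_congr
    intro i hi j hj
    rw [rtS]
    split_ifs with h
    · rw [hval i j h hj]
    · rfl
    · rfl
  rw [edp, ert]

-- ===== VERDICT (by name: the statement is the Claim_ definition above) =====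
theorem solve_discrete_spec : Claim_equal_solve_discrete := by
  intro arr _ _
  unfold Spec_solve_discrete
  rw [A_eq, B_eq]
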